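-- pv_equiv track=rewrite | github.com/pypi-data/pypi-mirror-256 | packages/sheesh/sheesh-0.0.2-py3-none-any.whl/sheesh/crypt/crypto_utils.py | calculate_charset_size
-- ===== SOURCE A (Python) =====
-- def calculate_charset_size(s: str) -> int:
--     charset_size = 0
--     if any(c.islower() for c in s):
--         charset_size += 26
--
--     if any(c.isupper() for c in s):
--         charset_size += 26
--
--     if any(c.isdigit() for c in s):
--         charset_size += 10
--
--     special_chars = "!@#$%^&*()-_+=[]{}|;:',.<>?/"
--     if any(c in special_chars for c in s):
--         charset_size += 28
--     return charset_size
-- ===== SOURCE B (Python) =====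
-- def calculate_charset_size(s: str) -> int:
--     special_chars = "!@#$%^&*()-_+=[]{}|;:',.<>?/"
--     has_lower = has_upper = has_digit = has_special = False
--     for c in s:
--         if c.islower():
--             has_lower = True
--         elif c.isupper():
--             has_upper = True
--         elif c.isdigit():
--             has_digit = True
--         elif c in special_chars:
--             has_special = True
--     return 26 * has_lower + 26 * has_upper + 10 * has_digit + 28 * has_special
-- ===== Notes on version B (the rewrite author's own statement) =====
-- stated objective: simpler
-- what changed: Replaces four separate any()-scans over the string by one single pass maintaining four boolean flags (the class tests are mutually exclusive, so an elif chain suffices), summed arithmetically at the end.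
import Mathlib
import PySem

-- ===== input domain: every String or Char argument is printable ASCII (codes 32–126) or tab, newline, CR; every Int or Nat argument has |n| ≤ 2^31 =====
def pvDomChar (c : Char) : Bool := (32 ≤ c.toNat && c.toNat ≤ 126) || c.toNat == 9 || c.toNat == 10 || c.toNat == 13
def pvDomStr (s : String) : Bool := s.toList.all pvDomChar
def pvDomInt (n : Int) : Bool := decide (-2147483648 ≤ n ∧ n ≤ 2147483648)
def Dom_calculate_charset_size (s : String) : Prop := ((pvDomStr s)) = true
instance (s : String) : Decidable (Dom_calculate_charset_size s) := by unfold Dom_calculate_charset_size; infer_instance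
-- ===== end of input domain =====

-- B replaces A's four separate any()-scans by one pass keeping four boolean flags; objective: simpler.

-- ===== PORT A =====
def calculate_charset_size (s : String) : Int :=
  let charset_size : Int := 0
  let charset_size := if s.toList.any (fun c => PySem.Chars.islower c) then charset_size + 26 else charset_size
  let charset_size := if s.toList.any (fun c => PySem.Chars.isupper c) then charset_size + 26 else charset_size
  let charset_size := if s.toList.any (fun c => PySem.Chars.isdigit c) then charset_size + 10 else charset_size
  let special_chars := "!@#$%^&*()-_+=[]{}|;:',.<>?/"
  let charset_size := if s.toList.any (fun c => special_chars.toList.contains c) then charset_size + 28 else charset_size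
  charset_size

-- ===== PORT B =====
def pvSpecialB : List Char := "!@#$%^&*()-_+=[]{}|;:',.<>?/".toList

def pvStepB (fl : Bool × Bool × Bool × Bool) (c : Char) : Bool × Bool × Bool × Bool :=
  if PySem.Chars.islower c then (true, fl.2.1, fl.2.2.1, fl.2.2.2)
  else if PySem.Chars.isupper c then (fl.1, true, fl.2.2.1, fl.2.2.2)
  else if PySem.Chars.isdigit c then (fl.1, fl.2.1, true, fl.2.2.2)
  else if pvSpecialB.contains c then (fl.1, fl.2.1, fl.2.2.1, true)
  else fl

def calculate_charset_size_alt (s : String) : Int :=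
  let f := s.toList.foldl pvStepB (false, false, false, false)
  26 * (if f.1 then (1 : Int) else 0) + 26 * (if f.2.1 then (1 : Int) else 0)
    + 10 * (if f.2.2.1 then (1 : Int) else 0) + 28 * (if f.2.2.2 then (1 : Int) else 0)

-- ===== PRECONDITION & SPEC =====
def Spec_calculate_charset_size (s : String) (out : Int) : Prop := out = calculate_charset_size_alt s
instance (s : String) (out : Int) : Decidable (Spec_calculate_charset_size s out) := by unfold Spec_calculate_charset_size; infer_instance

-- ===== CLAIM (what is proved, stated in full; the proofs are below) =====
def Claim_equal_calculate_charset_size : Prop := ∀ (s : String), Dom_calculate_charset_size s → Spec_calculate_charset_size s (calculate_charset_size s)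

-- ===== LEMMAS AND PROOFS =====

lemma lower_not_upper (c : Char) (h : PySem.Chars.islower c = true) : PySem.Chars.isupper c = false := by
  simp [PySem.Chars.islower, PySem.Chars.isupper, Char.le_def, UInt32.le_iff_toNat_le] at *
  omega

lemma lower_not_digit (c : Char) (h : PySem.Chars.islower c = true) : PySem.Chars.isdigit c = false := by
  simp [PySem.Chars.islower, PySem.Chars.isdigit, Char.le_def, UInt32.le_iff_toNat_le] at *
  omega

lemma upper_not_digit (c : Char) (h : PySem.Chars.isupper c = true) : PySem.Chars.isdigit c = false := by
  simp [PySem.Chars.isupper, PySem.Chars.isdigit, Char.le_def, UInt32.le_iff_toNat_le] at *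
  omega

lemma special_not_alnum (c : Char) (h : c ∈ pvSpecialB) :
    PySem.Chars.islower c = false ∧ PySem.Chars.isupper c = false ∧ PySem.Chars.isdigit c = false := by
  simp [pvSpecialB] at h
  rcases h with h | h | h | h | h | h | h | h | h | h | h | h | h | h | h | h | h | h | h | h | h | h | h | h | h | h | h | h <;> subst h <;> decide

lemma foldl_stepB (cs : List Char) (l u d sp : Bool) :
    cs.foldl pvStepB (l, u, d, sp) =
      (l || cs.any (fun c => PySem.Chars.islower c),
       u || cs.any (fun c => PySem.Chars.isupper c),
       d || cs.any (fun c => PySem.Chars.isdigit c),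
       sp || cs.any (fun c => pvSpecialB.contains c)) := by
  induction cs generalizing l u d sp with
  | nil => simp
  | cons c cs ih =>
    simp only [List.foldl_cons, List.any_cons, pvStepB]
    split_ifs with h1 h2 h3 h4
    · have := lower_not_upper c h1
      have := lower_not_digit c h1
      have hsp : ¬ c ∈ pvSpecialB := fun hc => by
        have := (special_not_alnum c hc).1; simp [this] at h1
      simp [ih, h1, ‹PySem.Chars.isupper c = false›, ‹PySem.Chars.isdigit c = false›, hsp]
    · have := upper_not_digit c h2
      have hsp : ¬ c ∈ pvSpecialB := fun hc => by
        have := (special_not_alnum c hc).2.1; simp [this] at h2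
      simp [ih, h2, Bool.not_eq_true _ ▸ h1, ‹PySem.Chars.isdigit c = false›, hsp]
    · have hsp : ¬ c ∈ pvSpecialB := fun hc => by
        have := (special_not_alnum c hc).2.2; simp [this] at h3
      simp [ih, h3, Bool.not_eq_true _ ▸ h1, Bool.not_eq_true _ ▸ h2, hsp]
    · simp at h4
      simp [ih, h4, Bool.not_eq_true _ ▸ h1, Bool.not_eq_true _ ▸ h2, Bool.not_eq_true _ ▸ h3]
    · simp at h4
      simp [ih, h4, Bool.not_eq_true _ ▸ h1, Bool.not_eq_true _ ▸ h2, Bool.not_eq_true _ ▸ h3]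

-- ===== VERDICT (by name: the statement is the Claim_ definition above) =====
theorem calculate_charset_size_spec : Claim_equal_calculate_charset_size := by
  intro s _
  unfold Spec_calculate_charset_size calculate_charset_size calculate_charset_size_alt
  have hsp : ("!@#$%^&*()-_+=[]{}|;:',.<>?/").toList = pvSpecialB := rfl
  simp only [foldl_stepB, Bool.false_or]
  rw [hsp]
  generalize (s.toList.any fun c => PySem.Chars.islower c) = a
  generalize (s.toList.any fun c => PySem.Chars.isupper c) = b
  generalize (s.toList.any fun c => PySem.Chars.isdigit c) = d
  generalize (s.toList.any fun c => pvSpecialB.contains c) = e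
  cases a <;> cases b <;> cases d <;> cases e <;> norm_num
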